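-- pv_equiv track=rewrite | github.com/CharnyshMM/sca-web-app | sca_web_back/sca_web_back/sca_api_app/neo_querier.py | split_domain_dynamics
-- ===== SOURCE A (Python) =====
-- def split_domain_dynamics(years):
--     before_1950 = 0
--     between_1950_and_1970 = 0
--     between_1970_and_1990 = 0
--     between_1990_and_2010 = 0
--     after_2010 = 0
--     for y in years:
--         if y <= 1950:
--             before_1950 += 1
--         elif 1950 < y <= 1970:
--             between_1950_and_1970 += 1
--         elif 1970 < y <= 1990:
--             between_1970_and_1990 += 1
--         elif 1990 < y <= 2010:
--             between_1990_and_2010 += 1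
--         elif y > 2010:
--             after_2010 += 1
--     return {
--         "before_1950": before_1950,
--         "between_1950_and_1970": between_1950_and_1970,
--         "between_1970_and_1990": between_1970_and_1990,
--         "between_1990_and_2010": between_1990_and_2010,
--         "after_2010": after_2010,
--         "maximum_count": max(
--             before_1950,
--             between_1950_and_1970,
--             between_1970_and_1990,
--             between_1990_and_2010,
--             after_2010
--         )
--     }
-- ===== SOURCE B (Python) =====
-- _KEYS = ["before_1950", "between_1950_and_1970", "between_1970_and_1990",
--          "between_1990_and_2010", "after_2010"]
--
-- def split_domain_dynamics(years):
--     # staged passes: cumulative counts at each boundary, buckets by subtraction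
--     c1950 = sum(1 for y in years if y <= 1950)
--     c1970 = sum(1 for y in years if y <= 1970)
--     c1990 = sum(1 for y in years if y <= 1990)
--     c2010 = sum(1 for y in years if y <= 2010)
--     counts = [c1950, c1970 - c1950, c1990 - c1970, c2010 - c1990, len(years) - c2010]
--     result = dict(zip(_KEYS, counts))
--     result["maximum_count"] = max(counts)
--     return result
-- ===== Notes on version B (the rewrite author's own statement) =====
-- stated objective: alternative
-- what changed: Replaces A's single pass with a five-way if/elif branch by four independent cumulative-count passes (count of years at or below each boundary) from which the bucket sizes are derived by subtraction; no per-element branching into buckets at all.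
import Mathlib
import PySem

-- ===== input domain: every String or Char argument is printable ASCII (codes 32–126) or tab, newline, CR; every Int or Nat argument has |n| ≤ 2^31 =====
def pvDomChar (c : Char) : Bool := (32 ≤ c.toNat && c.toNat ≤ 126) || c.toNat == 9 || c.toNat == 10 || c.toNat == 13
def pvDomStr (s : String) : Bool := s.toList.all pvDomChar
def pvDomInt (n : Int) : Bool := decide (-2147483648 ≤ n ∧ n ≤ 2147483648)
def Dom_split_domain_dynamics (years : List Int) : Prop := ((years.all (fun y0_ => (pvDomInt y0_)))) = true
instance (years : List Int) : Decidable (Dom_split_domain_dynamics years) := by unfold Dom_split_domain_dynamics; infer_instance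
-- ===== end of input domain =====

-- B replaces A's single-pass five-way branch by four cumulative-count passes
-- (years ≤ each boundary) and derives the bucket sizes by subtraction (objective: alternative).

-- ===== PORT A =====
def split_domain_dynamics (years : List Int) : List (String × Int) :=
  let s := years.foldl (fun (st : Int × Int × Int × Int × Int) (y : Int) =>
    let (a, b, c, d, e) := st
    if y ≤ 1950 then (a + 1, b, c, d, e)
    else if 1950 < y ∧ y ≤ 1970 then (a, b + 1, c, d, e)
    else if 1970 < y ∧ y ≤ 1990 then (a, b, c + 1, d, e)
    else if 1990 < y ∧ y ≤ 2010 then (a, b, c, d + 1, e)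
    else if 2010 < y then (a, b, c, d, e + 1)
    else st) (0, 0, 0, 0, 0)
  [("before_1950", s.1), ("between_1950_and_1970", s.2.1),
   ("between_1970_and_1990", s.2.2.1), ("between_1990_and_2010", s.2.2.2.1),
   ("after_2010", s.2.2.2.2),
   ("maximum_count", max (max (max (max s.1 s.2.1) s.2.2.1) s.2.2.2.1) s.2.2.2.2)]

-- ===== PORT B =====
def pvKeys : List String :=
  ["before_1950", "between_1950_and_1970", "between_1970_and_1990",
   "between_1990_and_2010", "after_2010"]

-- one cumulative pass: number of years at or below the boundary b
def pvCumCount (years : List Int) (b : Int) : Int :=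
  (years.countP (fun y => decide (y ≤ b)) : Int)

def split_domain_dynamics_alt (years : List Int) : List (String × Int) :=
  let c1950 := pvCumCount years 1950
  let c1970 := pvCumCount years 1970
  let c1990 := pvCumCount years 1990
  let c2010 := pvCumCount years 2010
  let counts : List Int :=
    [c1950, c1970 - c1950, c1990 - c1970, c2010 - c1990, (years.length : Int) - c2010]
  pvKeys.zip counts ++ [("maximum_count", ((PySem.List.max? counts (fun x => x)).getD 0))]

-- ===== PRECONDITION & SPEC =====
def Spec_split_domain_dynamics (years : List Int) (out : List (String × Int)) : Prop := out = split_domain_dynamics_alt years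
instance (years : List Int) (out : List (String × Int)) : Decidable (Spec_split_domain_dynamics years out) := by unfold Spec_split_domain_dynamics; infer_instance

-- ===== CLAIM (what is proved, stated in full; the proofs are below) =====
def Claim_equal_split_domain_dynamics : Prop := ∀ (years : List Int), Dom_split_domain_dynamics years → Spec_split_domain_dynamics years (split_domain_dynamics years)

-- ===== LEMMAS AND PROOFS =====

-- A's fold, started at (a,b,c,d,e), adds the five interval counts to the accumulators
theorem pv_fold_eq (years : List Int) : ∀ (a b c d e : Int),
    years.foldl (fun (st : Int × Int × Int × Int × Int) (y : Int) =>
      let (a, b, c, d, e) := st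
      if y ≤ 1950 then (a + 1, b, c, d, e)
      else if 1950 < y ∧ y ≤ 1970 then (a, b + 1, c, d, e)
      else if 1970 < y ∧ y ≤ 1990 then (a, b, c + 1, d, e)
      else if 1990 < y ∧ y ≤ 2010 then (a, b, c, d + 1, e)
      else if 2010 < y then (a, b, c, d, e + 1)
      else (a, b, c, d, e)) (a, b, c, d, e)
    = (a + (years.countP (fun y => decide (y ≤ 1950)) : Int),
       b + (years.countP (fun y => decide (1950 < y ∧ y ≤ 1970)) : Int),
       c + (years.countP (fun y => decide (1970 < y ∧ y ≤ 1990)) : Int),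
       d + (years.countP (fun y => decide (1990 < y ∧ y ≤ 2010)) : Int),
       e + (years.countP (fun y => decide (2010 < y)) : Int)) := by
  induction years with
  | nil => intro a b c d e; simp
  | cons y t ih =>
    intro a b c d e
    simp only [List.foldl_cons, List.countP_cons]
    by_cases h1 : y ≤ 1950
    · simp only [if_pos h1]
      rw [ih (a+1) b c d e]
      simp only [Prod.mk.injEq]
      refine ⟨?_, ?_, ?_, ?_, ?_⟩ <;>
        simp [h1, show ¬(1950 < y ∧ y ≤ 1970) by omega, show ¬(1970 < y ∧ y ≤ 1990) by omega,
              show ¬(1990 < y ∧ y ≤ 2010) by omega, show ¬(2010 < y) by omega] <;>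
        push_cast <;> ring
    · by_cases h2 : y ≤ 1970
      · simp only [if_neg h1, if_pos (show 1950 < y ∧ y ≤ 1970 by omega)]
        rw [ih a (b+1) c d e]
        simp only [Prod.mk.injEq]
        refine ⟨?_, ?_, ?_, ?_, ?_⟩ <;>
          simp [h1, show 1950 < y ∧ y ≤ 1970 by omega, show ¬(1970 < y ∧ y ≤ 1990) by omega,
                show ¬(1990 < y ∧ y ≤ 2010) by omega, show ¬(2010 < y) by omega] <;>
          push_cast <;> ring
      · by_cases h3 : y ≤ 1990
        · simp only [if_neg h1, if_neg (show ¬(1950 < y ∧ y ≤ 1970) by omega),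
            if_pos (show 1970 < y ∧ y ≤ 1990 by omega)]
          rw [ih a b (c+1) d e]
          simp only [Prod.mk.injEq]
          refine ⟨?_, ?_, ?_, ?_, ?_⟩ <;>
            simp [h1, show ¬(1950 < y ∧ y ≤ 1970) by omega, show 1970 < y ∧ y ≤ 1990 by omega,
                  show ¬(1990 < y ∧ y ≤ 2010) by omega, show ¬(2010 < y) by omega] <;>
            push_cast <;> ring
        · by_cases h4 : y ≤ 2010
          · simp only [if_neg h1, if_neg (show ¬(1950 < y ∧ y ≤ 1970) by omega),
              if_neg (show ¬(1970 < y ∧ y ≤ 1990) by omega),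
              if_pos (show 1990 < y ∧ y ≤ 2010 by omega)]
            rw [ih a b c (d+1) e]
            simp only [Prod.mk.injEq]
            refine ⟨?_, ?_, ?_, ?_, ?_⟩ <;>
              simp [h1, show ¬(1950 < y ∧ y ≤ 1970) by omega, show ¬(1970 < y ∧ y ≤ 1990) by omega,
                    show 1990 < y ∧ y ≤ 2010 by omega, show ¬(2010 < y) by omega] <;>
              push_cast <;> ring
          · simp only [if_neg h1, if_neg (show ¬(1950 < y ∧ y ≤ 1970) by omega),
              if_neg (show ¬(1970 < y ∧ y ≤ 1990) by omega),
              if_neg (show ¬(1990 < y ∧ y ≤ 2010) by omega),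
              if_pos (show 2010 < y by omega)]
            rw [ih a b c d (e+1)]
            simp only [Prod.mk.injEq]
            refine ⟨?_, ?_, ?_, ?_, ?_⟩ <;>
              simp [h1, show ¬(1950 < y ∧ y ≤ 1970) by omega, show ¬(1970 < y ∧ y ≤ 1990) by omega,
                    show ¬(1990 < y ∧ y ≤ 2010) by omega, show 2010 < y by omega] <;>
              push_cast <;> ring

-- a cumulative count at a higher boundary splits into the lower cumulative count plus the interval count
theorem pv_count_split (lo hi : Int) (hlh : lo ≤ hi) (l : List Int) :
    l.countP (fun y => decide (y ≤ hi))
      = l.countP (fun y => decide (y ≤ lo)) + l.countP (fun y => decide (lo < y ∧ y ≤ hi)) := by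
  induction l with
  | nil => rfl
  | cons y t ih =>
    simp only [List.countP_cons, ih]
    by_cases h1 : y ≤ lo
    · simp [h1, show y ≤ hi by omega, show ¬lo < y by omega]
      omega
    · by_cases h2 : y ≤ hi
      · simp [h1, h2, show lo < y by omega]
        omega
      · simp [h1, h2]

-- the years above 2010 are exactly those not counted by the cumulative count at 2010
theorem pv_count_rest (l : List Int) :
    l.countP (fun y => decide (2010 < y)) + l.countP (fun y => decide (y ≤ 2010)) = l.length := by
  induction l with
  | nil => rfl
  | cons y t ih =>
    simp only [List.countP_cons, List.length_cons]
    by_cases h : y ≤ 2010 <;> simp [h, show (2010 < y) ↔ ¬(y ≤ 2010) by omega] <;> omega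

-- ===== VERDICT (by name: the statement is the Claim_ definition above) =====
theorem split_domain_dynamics_spec : Claim_equal_split_domain_dynamics := by
  intro years _
  unfold Spec_split_domain_dynamics split_domain_dynamics split_domain_dynamics_alt pvCumCount
  rw [pv_fold_eq years 0 0 0 0 0]
  have h2 := pv_count_split 1950 1970 (by norm_num) years
  have h3 := pv_count_split 1970 1990 (by norm_num) years
  have h4 := pv_count_split 1990 2010 (by norm_num) years
  have h5 := pv_count_rest years
  have e2 : (years.countP (fun y => decide (1950 < y ∧ y ≤ 1970)) : Int)
      = (years.countP (fun y => decide (y ≤ 1970)) : Int)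
        - (years.countP (fun y => decide (y ≤ 1950)) : Int) := by omega
  have e3 : (years.countP (fun y => decide (1970 < y ∧ y ≤ 1990)) : Int)
      = (years.countP (fun y => decide (y ≤ 1990)) : Int)
        - (years.countP (fun y => decide (y ≤ 1970)) : Int) := by omega
  have e4 : (years.countP (fun y => decide (1990 < y ∧ y ≤ 2010)) : Int)
      = (years.countP (fun y => decide (y ≤ 2010)) : Int)
        - (years.countP (fun y => decide (y ≤ 1990)) : Int) := by omega
  have e5 : (years.countP (fun y => decide (2010 < y)) : Int)
      = (years.length : Int) - (years.countP (fun y => decide (y ≤ 2010)) : Int) := by omega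
  simp only [pvKeys, List.zip, List.zipWith, List.cons_append, List.nil_append,
    PySem.List.max?_id_cons, Option.getD_some, List.foldl, zero_add, e2, e3, e4, e5]
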